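-- pv_equiv track=rewrite | github.com/HAUSchamp/tradelist_parser | generate_string.py | resolve_mon
-- ===== SOURCE A (Python) =====
-- def resolve_mon(mon, fam_mon_map):
-- 	"""
-- 	Resolves name name of family to base Pokemon name, if applicable.
-- 	Otherwise returns name given.
-- 	"""
-- 	if "_UPTO_" in mon:
-- 		added_mon = []
-- 		family, stop_at_mon = mon.split("_UPTO_")
-- 		for m in fam_mon_map[family]:
-- 			added_mon.append(m)
-- 			if stop_at_mon == m:
-- 				break
-- 		return added_mon
-- 	elif "FAMILY" in mon:
-- 		return ["+"+fam_mon_map[mon][0]]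
-- 	else:
-- 		return [mon]
-- ===== SOURCE B (Python) =====
-- def _prefix_upto(lst, stop):
-- 	"""Prefix of lst ending at the first occurrence of stop (a full copy if absent)."""
-- 	if not lst:
-- 		return []
-- 	if lst[0] == stop:
-- 		return [stop]
-- 	return [lst[0]] + _prefix_upto(lst[1:], stop)
--
--
-- def resolve_mon(mon, fam_mon_map):
-- 	"""
-- 	Resolves name name of family to base Pokemon name, if applicable.
-- 	Otherwise returns name given.
-- 	"""
-- 	if "_UPTO_" in mon:
-- 		family, stop_at_mon = mon.split("_UPTO_")
-- 		return _prefix_upto(fam_mon_map[family], stop_at_mon)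
-- 	elif "FAMILY" in mon:
-- 		return ["+" + fam_mon_map[mon][0]]
-- 	else:
-- 		return [mon]
-- ===== Notes on version B (the rewrite author's own statement) =====
-- stated objective: alternative
-- what changed: The _UPTO_ branch is recomputed by a structural recursion on the member list (a helper that returns [stop] at the first match and conses elements before it), instead of A's iterative accumulator loop with a break.
import Mathlib
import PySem

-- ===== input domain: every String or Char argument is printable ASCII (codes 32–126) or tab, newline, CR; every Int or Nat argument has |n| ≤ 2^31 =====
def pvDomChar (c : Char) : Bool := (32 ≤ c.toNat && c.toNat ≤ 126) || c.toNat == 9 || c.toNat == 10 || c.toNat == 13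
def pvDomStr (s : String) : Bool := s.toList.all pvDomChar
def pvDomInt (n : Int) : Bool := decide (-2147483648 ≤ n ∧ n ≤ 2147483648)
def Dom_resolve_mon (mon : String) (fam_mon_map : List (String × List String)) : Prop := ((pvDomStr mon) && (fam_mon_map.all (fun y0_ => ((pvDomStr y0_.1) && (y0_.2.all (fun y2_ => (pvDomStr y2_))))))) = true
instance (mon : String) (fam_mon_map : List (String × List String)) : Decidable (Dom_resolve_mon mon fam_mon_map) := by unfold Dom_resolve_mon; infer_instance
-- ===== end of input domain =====

-- B recomputes the _UPTO_ branch by structural recursion on the member list instead of A's iterative accumulate-with-break loop; objective: alternative.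


-- ===== PORT A =====
-- A's for-loop with break: append each m, stop after appending the match
def pvTakeUpto (stop : String) : List String → List String
  | [] => []
  | m :: rest => m :: (if stop = m then [] else pvTakeUpto stop rest)

def resolve_mon (mon : String) (fam_mon_map : List (String × List String)) : List String :=
  if PySem.Str.isIn "_UPTO_" mon then
    match PySem.Str.split? mon "_UPTO_" with
    | some [family, stop_at_mon] =>
        match fam_mon_map.lookup family with
        | some lst => pvTakeUpto stop_at_mon lst
        | none => []      -- KeyError: excluded by Pre_
    | _ => []             -- ValueError (unpack ≠ 2 parts): excluded by Pre_
  else if PySem.Str.isIn "FAMILY" mon then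
    match fam_mon_map.lookup mon with
    | some (x :: _) => ["+" ++ x]
    | some [] => []       -- IndexError: excluded by Pre_
    | none => []          -- KeyError: excluded by Pre_
  else [mon]

-- ===== PORT B =====
-- B's recursive helper: [stop] at the first match, cons before it
def pvPrefixUpto (lst : List String) (stop : String) : List String :=
  match lst with
  | m :: rest => if m = stop then [stop] else [m] ++ pvPrefixUpto rest stop
  | [] => []

def resolve_mon_alt (mon : String) (fam_mon_map : List (String × List String)) : List String :=
  if PySem.Str.isIn "_UPTO_" mon then
    match PySem.Str.split? mon "_UPTO_" with
    | none => []                 -- unreachable (sep is non-empty)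
    | some parts =>
      match parts with
      | [] => []                 -- ValueError (unpack ≠ 2 parts): excluded by Pre_
      | family :: rest =>
        match rest with
        | [] => []               -- ValueError: excluded by Pre_
        | stop_at_mon :: rest2 =>
          match rest2 with
          | _ :: _ => []         -- ValueError: excluded by Pre_
          | [] =>
            match fam_mon_map.lookup family with
            | none => []         -- KeyError: excluded by Pre_
            | some lst => pvPrefixUpto lst stop_at_mon
  else if PySem.Str.isIn "FAMILY" mon then
    match fam_mon_map.lookup mon with
    | none => []                 -- KeyError: excluded by Pre_
    | some lst =>
      match lst with
      | x :: _ => ["+" ++ x]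
      | [] => []                 -- IndexError: excluded by Pre_
  else [mon]

-- ===== PRECONDITION & SPEC =====
-- Pre_ excludes exactly the inputs where Python A raises: '_UPTO_' splitting mon into ≠ 2 parts (ValueError),
-- a family / FAMILY key missing from the dict (KeyError), and an empty member list in the FAMILY branch (IndexError).
def Pre_resolve_mon (mon : String) (fam_mon_map : List (String × List String)) : Prop :=
  (PySem.Str.isIn "_UPTO_" mon = true →
    ((PySem.Str.split? mon "_UPTO_").getD []).length = 2 ∧
    ((PySem.Str.split? mon "_UPTO_").getD []).headD "" ∈ fam_mon_map.map Prod.fst) ∧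
  (PySem.Str.isIn "_UPTO_" mon = false → PySem.Str.isIn "FAMILY" mon = true →
    mon ∈ fam_mon_map.map Prod.fst ∧ (fam_mon_map.lookup mon).getD [] ≠ [])
instance (mon : String) (fam_mon_map : List (String × List String)) : Decidable (Pre_resolve_mon mon fam_mon_map) := by unfold Pre_resolve_mon; infer_instance

def pvWitness_resolve_mon : String × (List (String × List String)) :=
  ("Fam_UPTO_b", [("Fam", ["a", "b", "c"])])

def Spec_resolve_mon (mon : String) (fam_mon_map : List (String × List String)) (out : List String) : Prop := out = resolve_mon_alt mon fam_mon_map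
instance (mon : String) (fam_mon_map : List (String × List String)) (out : List String) : Decidable (Spec_resolve_mon mon fam_mon_map out) := by unfold Spec_resolve_mon; infer_instance

-- ===== CLAIM =====
def Claim_equal_resolve_mon : Prop := ∀ (mon : String) (fam_mon_map : List (String × List String)), Dom_resolve_mon mon fam_mon_map → Pre_resolve_mon mon fam_mon_map → Spec_resolve_mon mon fam_mon_map (resolve_mon mon fam_mon_map)

-- ===== LEMMAS AND PROOFS =====
-- A's accumulate-with-break loop computes the same list as B's structural recursion.
theorem pvTakeUpto_eq_prefixUpto (stop : String) (lst : List String) :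
    pvTakeUpto stop lst = pvPrefixUpto lst stop := by
  induction lst with
  | nil => rfl
  | cons m rest ih =>
    by_cases h : m = stop
    · subst h; simp [pvTakeUpto, pvPrefixUpto]
    · rw [pvTakeUpto, pvPrefixUpto, if_neg h, if_neg (fun e => h e.symm), ih]; rfl

-- ===== VERDICT =====
theorem resolve_mon_spec : Claim_equal_resolve_mon := by
  intro mon fam_mon_map _ _
  unfold Spec_resolve_mon resolve_mon resolve_mon_alt
  by_cases h1 : PySem.Str.isIn "_UPTO_" mon
  · simp only [h1, if_true]
    cases hsp : PySem.Str.split? mon "_UPTO_" with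
    | none => rfl
    | some parts =>
      match parts with
      | [] => rfl
      | [_] => rfl
      | _ :: _ :: _ :: _ => rfl
      | [family, stop] =>
        cases hlk : List.lookup family fam_mon_map with
        | none => simp only [hlk]
        | some lst => simp only [hlk]; exact pvTakeUpto_eq_prefixUpto stop lst
  · rw [if_neg h1, if_neg h1]
    by_cases h2 : PySem.Str.isIn "FAMILY" mon = true
    · rw [if_pos h2, if_pos h2]
      cases List.lookup mon fam_mon_map with
      | none => rfl
      | some lst => cases lst <;> rfl
    · rw [if_neg h2, if_neg h2]
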